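-- pv_equiv track=rewrite | github.com/Roverlucas/genai-reproducibility-protocol | analysis/regenerate_figures_v4.py | identify_condition
-- ===== SOURCE A (Python) =====
-- def identify_condition(run_data):
--     run_id = run_data.get("run_id", "")
--     parts = run_id.split("_")
--     for i, part in enumerate(parts):
--         if part.startswith("C1") or part.startswith("C2") or part.startswith("C3"):
--             cond_parts = [part]
--             for j in range(i + 1, len(parts)):
--                 if parts[j].startswith("rep"):
--                     break
--                 cond_parts.append(parts[j])
--             return "_".join(cond_parts)
--     return "unknown"
-- ===== SOURCE B (Python) =====
-- def identify_condition(run_data):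
--     parts = run_data.get("run_id", "").split("_")
--     ans = "unknown"
--     chunk = []  # takewhile(not startswith "rep") of the suffix already seen
--     for part in reversed(parts):
--         if part.startswith("rep"):
--             chunk = []
--         else:
--             chunk = [part] + chunk
--         if part.startswith(("C1", "C2", "C3")):
--             ans = "_".join(chunk)
--     return ans
-- ===== Notes on version B (the rewrite author's own statement) =====
-- stated objective: alternative
-- what changed: Replaces A's forward nested scan (which, per candidate C-part, runs an inner loop collecting cond_parts until a rep-part) by a single right-to-left pass that maintains the takewhile-not-rep chunk of the suffix as an accumulator and overwrites the answer at each C-part, so the leftmost C-part's join survives.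
import Mathlib
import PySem

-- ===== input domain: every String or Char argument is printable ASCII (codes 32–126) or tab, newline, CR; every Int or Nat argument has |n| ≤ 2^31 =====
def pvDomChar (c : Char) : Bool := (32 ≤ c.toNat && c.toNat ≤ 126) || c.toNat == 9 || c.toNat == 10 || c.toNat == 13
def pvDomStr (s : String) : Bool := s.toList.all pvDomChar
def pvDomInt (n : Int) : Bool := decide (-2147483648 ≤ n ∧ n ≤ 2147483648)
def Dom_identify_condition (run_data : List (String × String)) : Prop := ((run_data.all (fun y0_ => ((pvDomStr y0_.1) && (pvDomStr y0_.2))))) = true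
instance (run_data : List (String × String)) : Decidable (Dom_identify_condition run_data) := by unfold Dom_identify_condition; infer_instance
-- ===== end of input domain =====

-- B replaces A's forward nested scan (inner cond_parts loop per C-candidate) by ONE
-- right-to-left pass keeping the takewhile-not-rep chunk of the suffix as accumulator
-- and overwriting the answer at each C-part; same O(n) cost, different traversal.
-- Return values proved equal on all inputs.

-- ===== PORT A =====
-- inner loop: for j in range(i+1, len(parts)): break on startswith("rep"), else append
def pvCondParts (parts : List String) (j : Nat) (cond_parts : List String) : List String :=
  if h : j < parts.length then
    if PySem.Str.startswith parts[j] "rep" then cond_parts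
    else pvCondParts parts (j + 1) (cond_parts ++ [parts[j]])
  else cond_parts
termination_by parts.length - j

-- outer loop: for i, part in enumerate(parts), early return on a C1/C2/C3 part
def pvScan (parts : List String) (i : Nat) : String :=
  if h : i < parts.length then
    if PySem.Str.startswith parts[i] "C1" || PySem.Str.startswith parts[i] "C2"
        || PySem.Str.startswith parts[i] "C3" then
      PySem.Str.join "_" (pvCondParts parts (i + 1) [parts[i]])
    else pvScan parts (i + 1)
  else "unknown"
termination_by parts.length - i

def identify_condition (run_data : List (String × String)) : String :=
  let run_id := (PySem.Dict.mk run_data).getD "run_id" ""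
  -- run_id.split("_"): sep is the non-empty literal "_", so split? is always some
  let parts := (PySem.Str.split? run_id "_").getD []
  pvScan parts 0

-- ===== PORT B =====
-- loop body: update chunk (reset on rep-part, else prepend), overwrite ans on C-part
def pvStep (st : String × List String) (part : String) : String × List String :=
  let chunk := if PySem.Str.startswith part "rep" then [] else part :: st.2
  let ans := if PySem.Str.startswith part "C1" || PySem.Str.startswith part "C2"
      || PySem.Str.startswith part "C3" then PySem.Str.join "_" chunk else st.1
  (ans, chunk)

def identify_condition_alt (run_data : List (String × String)) : String :=
  -- run_id.split("_") as in Source B; non-empty literal sep, split? always some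
  let parts := (PySem.Str.split? ((PySem.Dict.mk run_data).getD "run_id" "") "_").getD []
  -- for part in reversed(parts): … with state (ans, chunk)
  (parts.reverse.foldl pvStep ("unknown", [])).1

-- ===== PRECONDITION & SPEC =====
def Spec_identify_condition (run_data : List (String × String)) (out : String) : Prop := out = identify_condition_alt run_data
instance (run_data : List (String × String)) (out : String) : Decidable (Spec_identify_condition run_data out) := by unfold Spec_identify_condition; infer_instance

-- ===== CLAIM (what is proved, stated in full; the proofs are below) =====
def Claim_equal_identify_condition : Prop := ∀ (run_data : List (String × String)), Dom_identify_condition run_data → Spec_identify_condition run_data (identify_condition run_data)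

-- ===== LEMMAS AND PROOFS =====

-- structural restatement of A on a suffix list
def pvSpecA (parts : List String) : String :=
  match parts with
  | [] => "unknown"
  | p :: rest =>
    if PySem.Str.startswith p "C1" || PySem.Str.startswith p "C2"
        || PySem.Str.startswith p "C3" then
      PySem.Str.join "_" (p :: rest.takeWhile (fun q => !PySem.Str.startswith q "rep"))
    else pvSpecA rest

theorem pvCondParts_eq (parts : List String) (j : Nat) (acc : List String) :
    pvCondParts parts j acc
      = acc ++ (parts.drop j).takeWhile (fun q => !PySem.Str.startswith q "rep") := by
  rw [pvCondParts]
  by_cases h : j < parts.length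
  · rw [dif_pos h, List.drop_eq_getElem_cons h, List.takeWhile_cons]
    by_cases hrep : PySem.Str.startswith parts[j] "rep" = true
    · simp at hrep
      simp [hrep]
    · rw [Bool.not_eq_true] at hrep
      simp at hrep
      rw [pvCondParts_eq parts (j + 1) (acc ++ [parts[j]])]
      simp [hrep]
  · rw [dif_neg h, List.drop_eq_nil_of_le (by omega)]
    simp
termination_by parts.length - j

theorem pvScan_eq (parts : List String) (i : Nat) :
    pvScan parts i = pvSpecA (parts.drop i) := by
  unfold pvScan
  split
  · rename_i h
    rw [List.drop_eq_getElem_cons h]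
    unfold pvSpecA
    split
    · rw [pvCondParts_eq]
      simp
    · exact pvScan_eq parts (i + 1)
  · rename_i h
    rw [List.drop_eq_nil_of_le (by omega)]
    rfl
termination_by parts.length - i

-- a part starting with "rep" starts with none of "C1"/"C2"/"C3"
theorem pvRep_not_C (p : String) (hrep : PySem.Str.startswith p "rep" = true) :
    (PySem.Str.startswith p "C1" || PySem.Str.startswith p "C2"
      || PySem.Str.startswith p "C3") = false := by
  have h1 : ['r', 'e', 'p'] <+: p.toList :=
    (PySem.Chars.startswith_iff _ _).1 (by simpa using hrep)
  obtain ⟨t, ht⟩ := h1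
  simp only [Bool.or_eq_false_iff]
  refine ⟨⟨?_, ?_⟩, ?_⟩ <;>
  · rw [Bool.eq_false_iff]
    intro hC
    obtain ⟨t2, ht2⟩ := (PySem.Chars.startswith_iff _ _).1 (by simpa using hC)
    have h3 := ht.trans ht2.symm
    simp at h3

theorem pvFoldr_eq (parts : List String) :
    parts.foldr (fun p st => pvStep st p) ("unknown", [])
      = (pvSpecA parts, parts.takeWhile (fun q => !PySem.Str.startswith q "rep")) := by
  induction parts with
  | nil => rfl
  | cons p rest ih =>
    rw [List.foldr_cons, ih]
    unfold pvStep pvSpecA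
    rw [List.takeWhile_cons]
    by_cases hrep : PySem.Str.startswith p "rep" = true
    · have hc := pvRep_not_C p hrep
      simp only [hrep, hc, Bool.not_true]
      simp
      cases rest with
      | nil => simp [pvSpecA]
      | cons q t => simp [pvSpecA]
    · rw [Bool.not_eq_true] at hrep
      simp only [hrep, Bool.not_false]
      by_cases hc : (PySem.Str.startswith p "C1" || PySem.Str.startswith p "C2"
          || PySem.Str.startswith p "C3") = true
      · simp only [hc]
        simp
      · rw [Bool.not_eq_true] at hc
        simp only [hc]
        simp
        cases rest with
        | nil => simp [pvSpecA]
        | cons q t => simp [pvSpecA]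

theorem pvRev_eq (parts : List String) :
    (parts.reverse.foldl pvStep ("unknown", [])).1 = pvSpecA parts := by
  rw [List.foldl_reverse, pvFoldr_eq]

-- ===== VERDICT (by name: the statement is the Claim_ definition above) =====
theorem identify_condition_spec : Claim_equal_identify_condition := by
  intro run_data _
  unfold Spec_identify_condition identify_condition identify_condition_alt
  rw [pvRev_eq]
  exact pvScan_eq _ 0
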